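-- pv_equiv track=rewrite | github.com/AndreiHondrari/software-engineering-exploration | data_structures_and_algorithms/01_elementary/02_bit_fields/09_03_extract_variable_bitfield_part_with_limits_from_left.py | extract_bits_from_msb
-- ===== SOURCE A (Python) =====
-- def extract_bits_from_msb(
--     value: int,
--     start: int,
--     stop: int
-- ) -> int:
--     # make sure that we deal with maximum 8 bits
--     assert value <= 0b11111111, "bitfield must have a maximum size of 8 bits"
--
--     # make sure the start is not out of bound
--     assert start <= 7, "start is out of bound"
--
--     # make sure the stop is not out of bound
--     assert stop <= 7, "stop is out of bound"
--
--     # make sure the start is less then or equal to the stop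
--     assert start <= stop, "start must be less then or equal to stop"
--
--     extracted: int = 0b0
--
--     # sweep over the bits from pivot to the right (as many bits as required)
--     for i in range(stop-start+1):
--         nth_bitfield = value & (0b10000000 >> (i + start))
--         extracted = extracted | nth_bitfield
--
--     return extracted
-- ===== SOURCE B (Python) =====
-- def extract_bits_from_msb(
--     value: int,
--     start: int,
--     stop: int
-- ) -> int:
--     # make sure that we deal with maximum 8 bits
--     assert value <= 0b11111111, "bitfield must have a maximum size of 8 bits"
--
--     # make sure the start is not out of bound
--     assert start <= 7, "start is out of bound"
--
--     # make sure the stop is not out of bound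
--     assert stop <= 7, "stop is out of bound"
--
--     # make sure the start is less then or equal to the stop
--     assert start <= stop, "start must be less then or equal to stop"
--
--     # closed-form contiguous mask covering MSB-indexed bits start..stop
--     mask = ((1 << (stop - start + 1)) - 1) << (7 - stop)
--     return value & mask
-- ===== Notes on version B (the rewrite author's own statement) =====
-- stated objective: simpler
-- what changed: Replaced the per-bit accumulation loop (OR of value & (0x80 >> i) for each position) with a single closed-form contiguous mask ((1 << (stop-start+1)) - 1) << (7-stop) applied once.
import Mathlib
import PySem

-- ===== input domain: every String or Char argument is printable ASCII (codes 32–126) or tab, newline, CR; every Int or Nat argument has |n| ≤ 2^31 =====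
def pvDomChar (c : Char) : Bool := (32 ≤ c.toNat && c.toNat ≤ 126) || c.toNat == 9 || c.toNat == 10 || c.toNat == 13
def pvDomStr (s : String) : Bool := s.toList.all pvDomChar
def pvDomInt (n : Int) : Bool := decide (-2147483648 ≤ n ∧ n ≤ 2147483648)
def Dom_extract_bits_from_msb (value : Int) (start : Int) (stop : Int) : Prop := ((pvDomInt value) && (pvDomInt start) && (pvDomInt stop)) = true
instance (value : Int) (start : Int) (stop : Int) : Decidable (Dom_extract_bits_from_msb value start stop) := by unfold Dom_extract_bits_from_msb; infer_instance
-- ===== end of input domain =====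

-- B replaces A's per-bit accumulation loop with one closed-form contiguous mask; return values proved equal on Pre_.

-- ===== PORT A =====
def extract_bits_from_msb (value : Int) (start : Int) (stop : Int) : Int :=
  -- for i in range(stop-start+1): extracted = extracted | (value & (0b10000000 >> (i + start)))
  (PySem.List.pyRange 0 (stop - start + 1) 1).foldl
    (fun extracted i =>
      PySem.Int.bor extracted (PySem.Int.band value ((128 : Int) >>> (i + start).toNat)))
    0

-- ===== PORT B =====
def extract_bits_from_msb_alt (value : Int) (start : Int) (stop : Int) : Int :=
  -- mask = ((1 << (stop - start + 1)) - 1) << (7 - stop); return value & mask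
  PySem.Int.band value ((((1 : Int) <<< (stop - start + 1).toNat) - 1) <<< (7 - stop).toNat)

-- ===== PRECONDITION & SPEC =====
-- Pre_: exactly where Python A returns: the four asserts (value ≤ 255, start ≤ 7 implied, stop ≤ 7,
-- start ≤ stop) pass and no negative shift count occurs (0 ≤ start; a negative start raises ValueError).
def Pre_extract_bits_from_msb (value : Int) (start : Int) (stop : Int) : Prop :=
  value ≤ 255 ∧ 0 ≤ start ∧ start ≤ stop ∧ stop ≤ 7
instance (value : Int) (start : Int) (stop : Int) : Decidable (Pre_extract_bits_from_msb value start stop) := by unfold Pre_extract_bits_from_msb; infer_instance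

def pvWitness_extract_bits_from_msb : Int × Int × Int := (170, 2, 5)

def Spec_extract_bits_from_msb (value : Int) (start : Int) (stop : Int) (out : Int) : Prop := out = extract_bits_from_msb_alt value start stop
instance (value : Int) (start : Int) (stop : Int) (out : Int) : Decidable (Spec_extract_bits_from_msb value start stop out) := by unfold Spec_extract_bits_from_msb; infer_instance

-- ===== CLAIM (what is proved, stated in full; the proofs are below) =====
def Claim_equal_extract_bits_from_msb : Prop := ∀ (value : Int) (start : Int) (stop : Int), Dom_extract_bits_from_msb value start stop → Pre_extract_bits_from_msb value start stop → Spec_extract_bits_from_msb value start stop (extract_bits_from_msb value start stop)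

-- ===== LEMMAS AND PROOFS =====

-- Nat: ldiff m n plus the overlap m &&& n recovers m (binary induction).
theorem pv_ldiff_add_and (m : Nat) : ∀ n : Nat, Nat.ldiff m n + (m &&& n) = m := by
  induction m using Nat.binaryRec with
  | zero => intro n; simp [Nat.ldiff, Nat.bitwise_zero_left]
  | bit a m ih =>
    intro n
    induction n using Nat.binaryRec with
    | zero => simp [Nat.ldiff, Nat.bitwise_zero_right]
    | bit b n _ =>
      rw [Nat.ldiff_bit, Nat.land_bit, Nat.bit_val, Nat.bit_val, Nat.bit_val]
      have := ih n
      cases a <;> cases b <;> simp <;> omega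

-- Nat: subtracting the overlap is ldiff.
theorem pv_sub_and (m n : Nat) : m - (m &&& n) = Nat.ldiff m n := by
  have h := pv_ldiff_add_and m n
  omega

-- PySem band is Mathlib's Int.land.
theorem pv_band_eq_land (a b : Int) : PySem.Int.band a b = Int.land a b := by
  cases a <;> cases b <;>
    simp [PySem.Int.band, Int.land, pv_sub_and] <;> omega

-- PySem bor is Mathlib's Int.lor.
theorem pv_bor_eq_lor (a b : Int) : PySem.Int.bor a b = Int.lor a b := by
  cases a <;> cases b <;>
    simp [PySem.Int.bor, Int.lor, pv_sub_and] <;> omega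

-- Int: AND distributes over OR (bit extensionality through the Nat identities).
theorem pv_land_lor_distrib (v a b : Int) :
    Int.lor (Int.land v a) (Int.land v b) = Int.land v (Int.lor a b) := by
  cases v <;> cases a <;> cases b <;>
    simp only [Int.land.eq_def, Int.lor.eq_def] <;>
    (try congr 1) <;>
    apply Nat.eq_of_testBit_eq <;>
    intro i <;>
    simp only [Nat.testBit_lor, Nat.testBit_land, Nat.testBit_ldiff] <;>
    rename_i x y z <;>
    (cases x.testBit i <;> cases y.testBit i <;> cases z.testBit i <;> rfl)

-- The collection step used to fold A's loop into a single mask.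
theorem pv_bor_band_band (v a b : Int) :
    PySem.Int.bor (PySem.Int.band v a) (PySem.Int.band v b)
      = PySem.Int.band v (PySem.Int.bor a b) := by
  rw [pv_band_eq_land, pv_band_eq_land, pv_band_eq_land, pv_bor_eq_lor, pv_bor_eq_lor,
    pv_land_lor_distrib]

theorem pv_bor_zero_left (x : Int) : PySem.Int.bor 0 x = x := by
  rw [PySem.Int.bor_comm, PySem.Int.bor_zero]

-- ===== VERDICT (by name: the statement is the Claim_ definition above) =====
theorem extract_bits_from_msb_spec : Claim_equal_extract_bits_from_msb := by
  intro value start stop _ hPre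
  obtain ⟨_, hs0, hst, ht7⟩ := hPre
  unfold Spec_extract_bits_from_msb extract_bits_from_msb extract_bits_from_msb_alt
  have hs7 : start ≤ 7 := le_trans hst ht7
  interval_cases start <;> interval_cases stop <;>
    (rw [PySem.List.pyRange_one]
     ; norm_num [List.range_succ, show ((2:Int).toNat = 2 ∧ (3:Int).toNat = 3 ∧ (4:Int).toNat = 4 ∧ (5:Int).toNat = 5 ∧ (6:Int).toNat = 6 ∧ (7:Int).toNat = 7 ∧ (8:Int).toNat = 8) from by omega]
     ; (try simp only [List.foldl_cons, pv_bor_zero_left, pv_bor_band_band])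
     ; (try congr 1))
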